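-- pv_equiv track=rewrite | github.com/bernardosulzbach/lyrics | lyrics/guesses.py | normalize_and_check_for_fuzzy_equality
-- ===== SOURCE A (Python) =====
-- def levenshtein(a, b):
--     if len(a) < len(b):
--         return levenshtein(b, a)
--
--     # len(s1) >= len(s2)
--     if len(b) == 0:
--         return len(a)
--
--     previous_row = range(len(b) + 1)
--     for i, c1 in enumerate(a):
--         current_row = [i + 1]
--         for j, c2 in enumerate(b):
--             # j+1 instead of j since previous_row and current_row are one character longer
--             insertions = previous_row[j + 1] + 1
--             deletions = current_row[j] + 1  # than s2
--             substitutions = previous_row[j] + (c1 != c2)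
--             current_row.append(min(insertions, deletions, substitutions))
--         previous_row = current_row
--
--     return previous_row[-1]
--
-- def normalize_and_check_for_fuzzy_equality(a, b):
--     """
--     Compares two strings case-insensitively for fuzzy equality according to the rules specified in the --help output.
--     """
--     words_of_a = [word for word in a.lower().split()]
--     words_of_b = [word for word in b.lower().split()]
--     if len(words_of_a) != len(words_of_b):
--         return False
--     # len(words_of_a) == len(words_of_b) is true here
--     pairs = [(words_of_a[i], words_of_b[i]) for i in range(len(words_of_a))]
--     distances = [levenshtein(*pair) for pair in pairs]
--     # We allow for floor(word_count / 2) typos, with a maximum of one typo (levenshtein distance of one) per word.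
--     return sum(distances) <= int(len(words_of_a) / 2) and all(distance <= 1 for distance in distances)
-- ===== SOURCE B (Python) =====
-- def _one_edit_apart(u, v):
--     # Skip the common prefix, then the remainders must agree after a single
--     # substitution, insertion or deletion at the first mismatch.
--     i = 0
--     n, m = len(u), len(v)
--     while i < n and i < m and u[i] == v[i]:
--         i += 1
--     return u[i + 1:] == v[i + 1:] or u[i:] == v[i + 1:] or u[i + 1:] == v[i:]
--
-- def normalize_and_check_for_fuzzy_equality(a, b):
--     """
--     Compares two strings case-insensitively for fuzzy equality according to the rules specified in the --help output.
--     """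
--     words_of_a = a.lower().split()
--     words_of_b = b.lower().split()
--     if len(words_of_a) != len(words_of_b):
--         return False
--     typos = 0
--     for u, v in zip(words_of_a, words_of_b):
--         if u == v:
--             continue
--         if not _one_edit_apart(u, v):
--             return False
--         typos += 1
--     return typos <= len(words_of_a) // 2
-- ===== Notes on version B (the rewrite author's own statement) =====
-- stated objective: faster
-- what changed: Each per-word-pair full O(L^2) Levenshtein DP is replaced by a linear-time one-edit-apart scan (distances are only ever compared against 1), and the typo count is accumulated in a single early-exit pass instead of building and re-scanning a distance list.
import Mathlib
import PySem

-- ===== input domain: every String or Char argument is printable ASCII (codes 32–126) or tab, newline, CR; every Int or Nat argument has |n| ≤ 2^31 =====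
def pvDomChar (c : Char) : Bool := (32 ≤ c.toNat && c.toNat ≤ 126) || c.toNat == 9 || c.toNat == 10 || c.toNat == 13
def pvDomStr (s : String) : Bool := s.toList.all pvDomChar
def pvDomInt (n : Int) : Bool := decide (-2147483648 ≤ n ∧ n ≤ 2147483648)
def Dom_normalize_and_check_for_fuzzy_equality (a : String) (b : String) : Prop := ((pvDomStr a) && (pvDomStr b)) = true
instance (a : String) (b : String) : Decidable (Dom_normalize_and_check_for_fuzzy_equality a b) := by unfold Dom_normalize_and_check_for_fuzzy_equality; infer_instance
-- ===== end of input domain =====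

-- B replaces each per-word-pair quadratic Levenshtein DP of A by a linear one-edit-apart scan
-- (a distance is only ever compared against 1) and counts typos in one early-exit pass.

-- ===== PORT A =====
-- Inner DP of A's `levenshtein` (the code after the initial swap / empty check is reached with the
-- arguments already ordered, so the one-shot tail-recursive swap is the wrapper `levenshteinA` below).
def levenshteinCore (a : List Char) (b : List Char) : Int :=
  if (b.length : Int) = 0 then (a.length : Int)
  else
    let prev0 : List Int := PySem.List.pyRange 0 ((b.length : Int) + 1) 1
    let prev := (PySem.List.enumerate a).foldl (fun prev ic =>
      (PySem.List.enumerate b).foldl (fun cur jc =>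
        cur ++ [min (PySem.List.pyGetD prev (jc.1 + 1) 0 + 1)
               (min (PySem.List.pyGetD cur jc.1 0 + 1)
                    (PySem.List.pyGetD prev jc.1 0 + (if ic.2 ≠ jc.2 then (1 : Int) else 0)))])
        [ic.1 + 1]) prev0
    PySem.List.pyGetD prev (-1) 0

def levenshteinA (a : String) (b : String) : Int :=
  if PySem.Str.len a < PySem.Str.len b then levenshteinCore b.toList a.toList
  else levenshteinCore a.toList b.toList

def normalize_and_check_for_fuzzy_equality (a : String) (b : String) : Bool :=
  let words_of_a := PySem.Str.split₀ (PySem.Str.lower a)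
  let words_of_b := PySem.Str.split₀ (PySem.Str.lower b)
  if words_of_a.length ≠ words_of_b.length then false
  else
    let pairs := (PySem.List.pyRange 0 ((words_of_a.length : Int)) 1).map
      (fun i => (PySem.List.pyGetD words_of_a i "", PySem.List.pyGetD words_of_b i ""))
    let distances := pairs.map (fun pr => levenshteinA pr.1 pr.2)
    -- int(len(words_of_a) / 2) is floor division here: the length is a nonnegative (exact) int
    decide (distances.sum ≤ (words_of_a.length : Int) / 2) && distances.all (fun d => d ≤ 1)

-- ===== PORT B =====
-- `_one_edit_apart`: the while loop consuming the common prefix is the equal-heads case;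
-- at the first mismatch (or the end of either word) the three slice comparisons are taken
-- literally (`drop 1` is the `[i+1:]` slice there).
def oneEditApart : List Char → List Char → Bool
  | x :: xs, y :: ys =>
    if x = y then oneEditApart xs ys
    else (xs == ys || (x :: xs) == ys || xs == (y :: ys))
  | u, v => (u.drop 1 == v.drop 1 || u == v.drop 1 || u.drop 1 == v)

-- the for-loop of B, with the typo counter as accumulator
def fuzzyGo : List (String × String) → Nat → Nat → Bool
  | [], typos, n => typos ≤ n / 2
  | (u, v) :: rest, typos, n =>
    if u = v then fuzzyGo rest typos n
    else if oneEditApart u.toList v.toList then fuzzyGo rest (typos + 1) n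
    else false

def normalize_and_check_for_fuzzy_equality_alt (a : String) (b : String) : Bool :=
  let words_of_a := PySem.Str.split₀ (PySem.Str.lower a)
  let words_of_b := PySem.Str.split₀ (PySem.Str.lower b)
  if words_of_a.length ≠ words_of_b.length then false
  else fuzzyGo (words_of_a.zip words_of_b) 0 words_of_a.length

-- ===== PRECONDITION & SPEC =====
def Spec_normalize_and_check_for_fuzzy_equality (a : String) (b : String) (out : Bool) : Prop := out = normalize_and_check_for_fuzzy_equality_alt a b
instance (a : String) (b : String) (out : Bool) : Decidable (Spec_normalize_and_check_for_fuzzy_equality a b out) := by unfold Spec_normalize_and_check_for_fuzzy_equality; infer_instance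

-- ===== CLAIM (what is proved, stated in full; the proofs are below) =====
def Claim_equal_normalize_and_check_for_fuzzy_equality : Prop := ∀ (a : String) (b : String), Dom_normalize_and_check_for_fuzzy_equality a b → Spec_normalize_and_check_for_fuzzy_equality a b (normalize_and_check_for_fuzzy_equality a b)

-- ===== LEMMAS AND PROOFS =====

def levR : List Char → List Char → Nat
  | [], v => v.length
  | _ :: xs, [] => xs.length + 1
  | x :: xs, y :: ys =>
    min (levR xs (y :: ys) + 1) (min (levR (x :: xs) ys + 1) (levR xs ys + (if x ≠ y then 1 else 0)))
  termination_by u v => u.length + v.length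
  decreasing_by all_goals (simp only [List.length_cons]; omega)

theorem levR_nil (v : List Char) : levR [] v = v.length := by rw [levR]

theorem levR_cons_nil (x : Char) (xs : List Char) : levR (x :: xs) [] = xs.length + 1 := by rw [levR]

theorem levR_cons_cons (x y : Char) (xs ys : List Char) :
    levR (x :: xs) (y :: ys) = min (levR xs (y :: ys) + 1) (min (levR (x :: xs) ys + 1) (levR xs ys + (if x ≠ y then 1 else 0))) := by
  rw [levR]

theorem levR_nil_right (u : List Char) : levR u [] = u.length := by
  cases u with
  | nil => rw [levR_nil]
  | cons x xs => rw [levR_cons_nil]; rfl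

theorem levR_cons_le (x : Char) (u v : List Char) : levR (x :: u) v ≤ levR u v + 1 := by
  cases v with
  | nil => simp [levR_nil_right]
  | cons y ys => rw [levR_cons_cons]; omega

theorem levR_cons_le_right (y : Char) (u v : List Char) : levR u (y :: v) ≤ levR u v + 1 := by
  cases u with
  | nil => simp [levR_nil]
  | cons x xs => rw [levR_cons_cons]; omega

theorem levR_mono_right (u v : List Char) (y : Char) : levR u v ≤ levR u (y :: v) + 1 := by
  induction u generalizing v with
  | nil => simp [levR_nil]; omega
  | cons x xs ih =>
    rw [levR_cons_cons x y xs v]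
    have h1 := levR_cons_le x xs v
    have h2 := ih v
    have h3 := levR_cons_le_right y xs v
    omega

theorem levR_mono_left (u v : List Char) (x : Char) : levR u v ≤ levR (x :: u) v + 1 := by
  induction v generalizing u with
  | nil => simp [levR_nil_right]; omega
  | cons y ys ih =>
    rw [levR_cons_cons x y u ys]
    have h2 := ih u
    have h3 := levR_cons_le_right y u ys
    omega

theorem levR_skip (x : Char) (u v : List Char) : levR (x :: u) (x :: v) = levR u v := by
  rw [levR_cons_cons]
  have h1 := levR_mono_right u v x
  have h2 := levR_mono_left u v x
  simp only [ne_eq, not_true_eq_false, if_false]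
  omega

theorem levR_eq_zero_iff (u v : List Char) : levR u v = 0 ↔ u = v := by
  induction u generalizing v with
  | nil => cases v <;> simp [levR_nil]
  | cons x xs ih =>
    cases v with
    | nil => simp [levR_cons_nil]
    | cons y ys =>
      by_cases hxy : x = y
      · subst hxy; rw [levR_skip]; simp [ih]
      · rw [levR_cons_cons]; simp [hxy]

def EditRel (u v : List Char) : Prop :=
  u = v ∨ (∃ p x y s, x ≠ y ∧ u = p ++ x :: s ∧ v = p ++ y :: s)
    ∨ (∃ p x s, u = p ++ x :: s ∧ v = p ++ s)
    ∨ (∃ p y s, u = p ++ s ∧ v = p ++ y :: s)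

theorem editRel_nil_left (v : List Char) : EditRel [] v ↔ v.length ≤ 1 := by
  constructor
  · rintro (rfl | ⟨p, x, y, s, hxy, hu, hv⟩ | ⟨p, x, s, hu, hv⟩ | ⟨p, y, s, hu, hv⟩)
    · simp
    · simp at hu
    · simp at hu
    · obtain ⟨rfl, rfl⟩ : p = [] ∧ s = [] := by simpa using hu.symm
      simp [hv]
  · intro h
    match v, h with
    | [], _ => left; rfl
    | [y], _ => right; right; right; exact ⟨[], y, [], rfl, rfl⟩

theorem editRel_nil_right (u : List Char) : EditRel u [] ↔ u.length ≤ 1 := by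
  constructor
  · rintro (rfl | ⟨p, x, y, s, hxy, hu, hv⟩ | ⟨p, x, s, hu, hv⟩ | ⟨p, y, s, hu, hv⟩)
    · simp
    · simp at hv
    · obtain ⟨rfl, rfl⟩ : p = [] ∧ s = [] := by simpa using hv.symm
      simp [hu]
    · simp at hv
  · intro h
    match u, h with
    | [], _ => left; rfl
    | [x], _ => right; right; left; exact ⟨[], x, [], rfl, rfl⟩

theorem editRel_cons_same (x : Char) (xs ys : List Char) :
    EditRel (x :: xs) (x :: ys) ↔ EditRel xs ys := by
  constructor
  · rintro (h | ⟨p, a, c, s, hac, hu, hv⟩ | ⟨p, a, s, hu, hv⟩ | ⟨p, a, s, hu, hv⟩)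
    · left; simpa using h
    · cases p with
      | nil =>
        simp at hu hv
        exact absurd (hu.1.symm.trans hv.1) hac
      | cons z p' =>
        simp at hu hv
        right; left; exact ⟨p', a, c, s, hac, hu.2, hv.2⟩
    · cases p with
      | nil =>
        simp at hu hv
        right; right; left
        exact ⟨[], x, ys, by simp [hu.2, ← hv], by simp⟩
      | cons z p' =>
        simp at hu hv
        right; right; left; exact ⟨p', a, s, hu.2, hv.2⟩
    · cases p with
      | nil =>
        simp at hu hv
        right; right; right
        exact ⟨[], x, xs, by simp, by simp [hv.2, ← hu]⟩
      | cons z p' =>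
        simp at hu hv
        right; right; right; exact ⟨p', a, s, hu.2, hv.2⟩
  · rintro (rfl | ⟨p, a, c, s, hac, rfl, rfl⟩ | ⟨p, a, s, rfl, rfl⟩ | ⟨p, a, s, rfl, rfl⟩)
    · left; rfl
    · right; left; exact ⟨x :: p, a, c, s, hac, rfl, rfl⟩
    · right; right; left; exact ⟨x :: p, a, s, rfl, rfl⟩
    · right; right; right; exact ⟨x :: p, a, s, rfl, rfl⟩

theorem editRel_cons_diff (x y : Char) (hxy : x ≠ y) (xs ys : List Char) :
    EditRel (x :: xs) (y :: ys) ↔ (xs = ys ∨ x :: xs = ys ∨ xs = y :: ys) := by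
  constructor
  · rintro (h | ⟨p, a, c, s, hac, hu, hv⟩ | ⟨p, a, s, hu, hv⟩ | ⟨p, a, s, hu, hv⟩)
    · exact absurd (List.cons.injEq .. ▸ h) (by simp [hxy])
    · cases p with
      | nil => simp at hu hv; left; rw [hu.2, hv.2]
      | cons z p' => simp at hu hv; exact absurd (hu.1.trans hv.1.symm) hxy
    · cases p with
      | nil => simp at hu hv; right; right; rw [hu.2, ← hv]
      | cons z p' => simp at hu hv; exact absurd (hu.1.trans hv.1.symm) hxy
    · cases p with
      | nil => simp at hu hv; right; left; rw [hv.2, ← hu]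
      | cons z p' => simp at hu hv; exact absurd (hu.1.trans hv.1.symm) hxy
  · rintro (rfl | h | h)
    · right; left; exact ⟨[], x, y, xs, hxy, rfl, rfl⟩
    · right; right; right; exact ⟨[], y, x :: xs, by simp, by simp [← h]⟩
    · right; right; left; exact ⟨[], x, xs, by simp, by simp [h]⟩

theorem editRel_symm (u v : List Char) (h : EditRel u v) : EditRel v u := by
  obtain (rfl | ⟨p, x, y, s, hxy, hu, hv⟩ | ⟨p, x, s, hu, hv⟩ | ⟨p, y, s, hu, hv⟩) := h
  · left; rfl
  · right; left; exact ⟨p, y, x, s, fun h' => hxy h'.symm, hv, hu⟩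
  · right; right; right; exact ⟨p, x, s, hv, hu⟩
  · right; right; left; exact ⟨p, y, s, hv, hu⟩

theorem editRel_reverse_of (u v : List Char) (h : EditRel u v) : EditRel u.reverse v.reverse := by
  obtain (rfl | ⟨p, x, y, s, hxy, rfl, rfl⟩ | ⟨p, x, s, rfl, rfl⟩ | ⟨p, y, s, rfl, rfl⟩) := h
  · left; rfl
  · right; left; exact ⟨s.reverse, x, y, p.reverse, hxy, by simp, by simp⟩
  · right; right; left; exact ⟨s.reverse, x, p.reverse, by simp, by simp⟩
  · right; right; right; exact ⟨s.reverse, y, p.reverse, by simp, by simp⟩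

theorem editRel_reverse (u v : List Char) : EditRel u.reverse v.reverse ↔ EditRel u v := by
  constructor
  · intro h; simpa using editRel_reverse_of _ _ h
  · exact editRel_reverse_of u v

theorem levR_le_one_iff (u v : List Char) : levR u v ≤ 1 ↔ EditRel u v := by
  induction u generalizing v with
  | nil => rw [editRel_nil_left, levR_nil]
  | cons x xs ih =>
    cases v with
    | nil => rw [editRel_nil_right, levR_cons_nil]; simp
    | cons y ys =>
      by_cases hxy : x = y
      · subst hxy; rw [levR_skip, editRel_cons_same]; exact ih ys
      · rw [levR_cons_cons, editRel_cons_diff x y hxy]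
        simp only [ne_eq, hxy, not_false_iff, if_true]
        constructor
        · intro h
          have h0 : levR xs (y :: ys) = 0 ∨ levR (x :: xs) ys = 0 ∨ levR xs ys = 0 := by omega
          rcases h0 with h0 | h0 | h0
          · right; right; exact (levR_eq_zero_iff _ _).mp h0
          · right; left; exact (levR_eq_zero_iff _ _).mp h0
          · left; exact (levR_eq_zero_iff _ _).mp h0
        · rintro (h | h | h) <;>
            [have h0 := (levR_eq_zero_iff xs ys).mpr h;
             have h0 := (levR_eq_zero_iff (x :: xs) ys).mpr h;
             have h0 := (levR_eq_zero_iff xs (y :: ys)).mpr h] <;> omega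

theorem oneEditApart_iff (u v : List Char) : oneEditApart u v = true ↔ EditRel u v := by
  induction u generalizing v with
  | nil =>
    rw [editRel_nil_left]
    cases v with
    | nil => simp [oneEditApart]
    | cons y ys => cases ys <;> simp [oneEditApart]
  | cons x xs ih =>
    cases v with
    | nil =>
      rw [editRel_nil_right]
      cases xs <;> simp [oneEditApart]
    | cons y ys =>
      by_cases hxy : x = y
      · subst hxy
        rw [oneEditApart, if_pos rfl, editRel_cons_same]; exact ih ys
      · rw [oneEditApart, if_neg hxy, editRel_cons_diff x y hxy]
        simp [or_assoc]

def levT (u v : List Char) : Nat := levR u.reverse v.reverse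

theorem levT_nil_right (u : List Char) : levT u [] = u.length := by
  simp [levT, levR_nil_right]

def rowSpec (b : List Char) (q : List Char) (m : Nat) : List Int :=
  (List.range m).map (fun j => ((levT q (b.take j) : Nat) : Int))

theorem rowSpec_succ (b q : List Char) (m : Nat) :
    rowSpec b q (m + 1) = rowSpec b q m ++ [((levT q (b.take m) : Nat) : Int)] := by
  simp [rowSpec, List.range_succ]

theorem rowSpec_getD (b q : List Char) (m j : Nat) (hj : j < m) :
    (rowSpec b q m).getD j 0 = ((levT q (b.take j) : Nat) : Int) := by
  simpa [rowSpec] using PySem.List.getD_map_range (fun j => ((levT q (b.take j) : Nat) : Int)) m j 0 hj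

theorem pyGetD_last (l : List Int) (z : Int) :
    PySem.List.pyGetD (l ++ [z]) (-1) 0 = z := by
  simp [PySem.List.pyGetD, PySem.List.pyGet?, PySem.List.pyIdx?]

theorem levT_rec (p : List Char) (c1 : Char) (b : List Char) (k : Nat) (hk : k < b.length) :
    ((levT (p ++ [c1]) (b.take (k + 1)) : Nat) : Int)
      = min (((levT p (b.take (k + 1)) : Nat) : Int) + 1)
          (min (((levT (p ++ [c1]) (b.take k) : Nat) : Int) + 1)
               (((levT p (b.take k) : Nat) : Int) + (if c1 ≠ b[k] then (1 : Int) else 0))) := by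
  have h2 : (b.take (k + 1)).reverse = b[k] :: (b.take k).reverse := by
    rw [List.take_add_one]
    simp [List.getElem?_eq_getElem hk]
  simp only [levT, List.reverse_append, List.reverse_cons, List.reverse_nil, List.nil_append,
    List.singleton_append, h2]
  rw [levR_cons_cons]
  push_cast [Nat.cast_min, apply_ite (fun n : Nat => (n : Int))]
  rfl

theorem inner_fold (b p : List Char) (c1 : Char) :
    ∀ (rest : List Char) (k : Nat), b.drop k = rest → k ≤ b.length →
    (PySem.List.enumerate rest (k : Int)).foldl (fun cur jc =>
        cur ++ [min (PySem.List.pyGetD (rowSpec b p (b.length + 1)) (jc.1 + 1) 0 + 1)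
               (min (PySem.List.pyGetD cur jc.1 0 + 1)
                    (PySem.List.pyGetD (rowSpec b p (b.length + 1)) jc.1 0 + (if c1 ≠ jc.2 then (1 : Int) else 0)))])
      (rowSpec b (p ++ [c1]) (k + 1))
    = rowSpec b (p ++ [c1]) (b.length + 1) := by
  intro rest
  induction rest with
  | nil =>
    intro k hdrop hk
    have : k = b.length := by
      have := congrArg List.length hdrop
      simp [List.length_drop] at this
      omega
    subst this
    simp [PySem.List.enumerate_nil]
  | cons c2 rest' ih =>
    intro k hdrop hk
    have hk' : k < b.length := by
      have := congrArg List.length hdrop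
      simp [List.length_drop] at this
      omega
    have hbk : b[k] = c2 ∧ b.drop (k + 1) = rest' := by
      have h := (List.drop_eq_getElem_cons hk').symm.trans hdrop
      simp only [List.cons.injEq] at h
      exact h
    rw [PySem.List.enumerate_cons, List.foldl_cons]
    have hcast : (k : Int) + 1 = ((k + 1 : Nat) : Int) := by push_cast; ring
    have hstep :
        (rowSpec b (p ++ [c1]) (k + 1)) ++
          [min (PySem.List.pyGetD (rowSpec b p (b.length + 1)) ((k : Int) + 1) 0 + 1)
               (min (PySem.List.pyGetD (rowSpec b (p ++ [c1]) (k + 1)) (k : Int) 0 + 1)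
                    (PySem.List.pyGetD (rowSpec b p (b.length + 1)) (k : Int) 0 + (if c1 ≠ c2 then (1 : Int) else 0)))]
        = rowSpec b (p ++ [c1]) (k + 1 + 1) := by
      rw [hcast, PySem.List.pyGetD_natCast, PySem.List.pyGetD_natCast, PySem.List.pyGetD_natCast]
      rw [rowSpec_getD b p _ (k + 1) (by omega), rowSpec_getD b p _ k (by omega),
          rowSpec_getD b (p ++ [c1]) _ k (by omega)]
      rw [rowSpec_succ b (p ++ [c1]) (k + 1)]
      rw [← hbk.1, levT_rec p c1 b k hk']
    rw [hstep, hcast]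
    exact ih (k + 1) hbk.2 (by omega)

theorem levT_singleton (b q : List Char) : rowSpec b q 1 = [(q.length : Int)] := by
  simp [rowSpec, levT_nil_right]

theorem outer_fold (a b : List Char) :
    ∀ (rest : List Char) (k : Nat), a.drop k = rest → k ≤ a.length →
    (PySem.List.enumerate rest (k : Int)).foldl (fun prev ic =>
      (PySem.List.enumerate b).foldl (fun cur jc =>
        cur ++ [min (PySem.List.pyGetD prev (jc.1 + 1) 0 + 1)
               (min (PySem.List.pyGetD cur jc.1 0 + 1)
                    (PySem.List.pyGetD prev jc.1 0 + (if ic.2 ≠ jc.2 then (1 : Int) else 0)))])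
        [ic.1 + 1])
      (rowSpec b (a.take k) (b.length + 1))
    = rowSpec b a (b.length + 1) := by
  intro rest
  induction rest with
  | nil =>
    intro k hdrop hk
    have : k = a.length := by
      have := congrArg List.length hdrop
      simp [List.length_drop] at this
      omega
    subst this
    simp [PySem.List.enumerate_nil, List.take_length]
  | cons c1 rest' ih =>
    intro k hdrop hk
    have hk' : k < a.length := by
      have := congrArg List.length hdrop
      simp [List.length_drop] at this
      omega
    have hak : a[k] = c1 ∧ a.drop (k + 1) = rest' := by
      have h := (List.drop_eq_getElem_cons hk').symm.trans hdrop
      simp only [List.cons.injEq] at h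
      exact h
    rw [PySem.List.enumerate_cons, List.foldl_cons]
    have hcast : (k : Int) + 1 = ((k + 1 : Nat) : Int) := by push_cast; ring
    have hstart : [(k : Int) + 1] = rowSpec b (a.take k ++ [c1]) 1 := by
      rw [levT_singleton]
      simp [List.length_take, Nat.min_eq_left (le_of_lt hk')]
    have hinner := inner_fold b (a.take k) c1 b 0 rfl (by omega)
    rw [show ((0 : Nat) : Int) = 0 from rfl] at hinner
    have htake : a.take k ++ [c1] = a.take (k + 1) := by
      rw [List.take_add_one, List.getElem?_eq_getElem hk', hak.1]; rfl
    rw [hstart]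
    rw [show (rowSpec b (a.take k ++ [c1]) 1) = rowSpec b (a.take k ++ [c1]) (0 + 1) from rfl]
    rw [hinner, htake, hcast]
    exact ih (k + 1) hak.2 (by omega)

theorem levenshteinCore_eq (a b : List Char) : levenshteinCore a b = ((levT a b : Nat) : Int) := by
  unfold levenshteinCore
  split
  · next h =>
    have hb : b = [] := by
      have : b.length = 0 := by exact_mod_cast h
      simpa using this
    subst hb
    rw [levT_nil_right]
  · next h =>
    have hinit : PySem.List.pyRange 0 ((b.length : Int) + 1) 1 = rowSpec b [] (b.length + 1) := by
      rw [show ((b.length : Int) + 1) = ((b.length + 1 : Nat) : Int) by push_cast; ring]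
      rw [show PySem.List.pyRange 0 ((b.length + 1 : Nat) : Int) 1
            = PySem.List.pyRange 0 ((b.length + 1 : Nat) : Int) from rfl]
      rw [PySem.List.pyRange_zero_natCast]
      unfold rowSpec
      apply List.map_congr_left
      intro j hj
      simp only [List.mem_range] at hj
      rw [levT]
      simp [levR_nil, List.length_take, Nat.min_eq_left (by omega : j ≤ b.length)]
    simp only [hinit]
    have ho := outer_fold a b a 0 rfl (by omega)
    rw [Nat.cast_zero] at ho
    rw [List.take_zero] at ho
    simp only [ho]
    rw [rowSpec_succ, pyGetD_last, List.take_length]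

theorem levT_eq_zero_iff (u v : List Char) : levT u v = 0 ↔ u = v := by
  rw [levT, levR_eq_zero_iff]
  constructor
  · intro h; simpa using congrArg List.reverse h
  · rintro rfl; rfl

theorem levT_le_one_iff (u v : List Char) : levT u v ≤ 1 ↔ EditRel u v := by
  rw [levT, levR_le_one_iff]
  exact editRel_reverse u v

theorem levenshteinA_eq_zero_iff (u v : String) : levenshteinA u v = 0 ↔ u = v := by
  unfold levenshteinA
  split <;> rw [levenshteinCore_eq] <;>
    rw [show ∀ n : Nat, ((n : Int) = 0 ↔ n = 0) from fun n => by omega] <;>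
    rw [levT_eq_zero_iff]
  · rw [← String.toList_inj]; exact eq_comm
  · rw [← String.toList_inj]

theorem levenshteinA_le_one_iff (u v : String) :
    levenshteinA u v ≤ 1 ↔ oneEditApart u.toList v.toList = true := by
  rw [oneEditApart_iff]
  unfold levenshteinA
  split <;> rw [levenshteinCore_eq] <;>
    rw [show ∀ n : Nat, ((n : Int) ≤ 1 ↔ n ≤ 1) from fun n => by omega] <;>
    rw [levT_le_one_iff]
  exact ⟨editRel_symm _ _, editRel_symm _ _⟩

theorem levenshteinA_nonneg (u v : String) : 0 ≤ levenshteinA u v := by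
  unfold levenshteinA; split <;> rw [levenshteinCore_eq] <;> positivity

theorem fuzzyGo_spec (prs : List (String × String)) (n : Nat) :
    ∀ typos : Nat, fuzzyGo prs typos n
      = (decide ((typos : Int) + (prs.map (fun pr => levenshteinA pr.1 pr.2)).sum ≤ (n : Int) / 2)
          && (prs.map (fun pr => levenshteinA pr.1 pr.2)).all (fun d => decide (d ≤ 1))) := by
  induction prs with
  | nil =>
    intro typos
    simp only [fuzzyGo, List.map_nil, List.sum_nil, List.all_nil, Bool.and_true, add_zero]
    have hdiv : ((n / 2 : Nat) : Int) = (n : Int) / 2 := Nat.ToInt.div_congr rfl rfl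
    rw [decide_eq_decide]
    omega
  | cons pr rest ih =>
    intro typos
    obtain ⟨u, v⟩ := pr
    by_cases huv : u = v
    · have hd : levenshteinA u v = 0 := (levenshteinA_eq_zero_iff u v).mpr huv
      rw [show fuzzyGo ((u, v) :: rest) typos n = fuzzyGo rest typos n by rw [fuzzyGo]; simp [huv]]
      rw [ih typos]
      simp [hd]
    · by_cases hoe : oneEditApart u.toList v.toList = true
      · have h1 : levenshteinA u v ≤ 1 := (levenshteinA_le_one_iff u v).mpr hoe
        have h0 : levenshteinA u v ≠ 0 := fun h => huv ((levenshteinA_eq_zero_iff u v).mp h)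
        have hd : levenshteinA u v = 1 := by have := levenshteinA_nonneg u v; omega
        rw [show fuzzyGo ((u, v) :: rest) typos n = fuzzyGo rest (typos + 1) n by
          rw [fuzzyGo]; simp [huv, hoe]]
        rw [ih (typos + 1)]
        simp [hd]
        rw [add_assoc]
      · have h1 : ¬ levenshteinA u v ≤ 1 := fun h => hoe ((levenshteinA_le_one_iff u v).mp h)
        rw [show fuzzyGo ((u, v) :: rest) typos n = false by rw [fuzzyGo]; simp [huv, hoe]]
        simp [h1]

theorem pairs_eq_zip (wa wb : List String) (h : wa.length = wb.length) :
    (PySem.List.pyRange 0 ((wa.length : Int)) 1).map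
      (fun i => (PySem.List.pyGetD wa i "", PySem.List.pyGetD wb i "")) = wa.zip wb := by
  rw [show PySem.List.pyRange 0 ((wa.length : Int)) 1 = PySem.List.pyRange 0 ((wa.length : Int)) from rfl]
  rw [PySem.List.pyRange_zero_natCast, List.map_map]
  apply List.ext_getElem
  · simp [List.length_zip, h]
  · intro i h1 h2
    simp only [List.getElem_map, List.getElem_range, Function.comp_apply]
    rw [PySem.List.pyGetD_natCast, PySem.List.pyGetD_natCast, List.getElem_zip]
    have hi : i < wa.length := by simpa using h1
    rw [List.getD_eq_getElem _ _ hi, List.getD_eq_getElem _ _ (h ▸ hi)]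

theorem main_equiv (a b : String) :
    normalize_and_check_for_fuzzy_equality a b = normalize_and_check_for_fuzzy_equality_alt a b := by
  by_cases hne : (PySem.Str.split₀ (PySem.Str.lower a)).length ≠ (PySem.Str.split₀ (PySem.Str.lower b)).length
  · simp only [normalize_and_check_for_fuzzy_equality, normalize_and_check_for_fuzzy_equality_alt,
      if_pos hne]
  · rw [not_not] at hne
    simp only [normalize_and_check_for_fuzzy_equality, normalize_and_check_for_fuzzy_equality_alt,
      if_neg (not_not_intro hne)]
    rw [pairs_eq_zip _ _ hne,
      fuzzyGo_spec ((PySem.Str.split₀ (PySem.Str.lower a)).zip (PySem.Str.split₀ (PySem.Str.lower b)))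
        (PySem.Str.split₀ (PySem.Str.lower a)).length 0]
    simp

-- ===== VERDICT (by name: the statement is the Claim_ definition above) =====
theorem normalize_and_check_for_fuzzy_equality_spec : Claim_equal_normalize_and_check_for_fuzzy_equality := by
  intro a b _
  exact main_equiv a b
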